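-- pv_equiv track=rewrite | github.com/minsuhaha/Oreumi | Python/7.8(binary, greedy)/baekjoon_binary.py | video_size
-- ===== SOURCE A (Python) =====
-- def video_size(N, M, lecture_lengths):
--     start = 1
--     end = sum(lecture_lengths)
--
--     while start <= end:
--         mid = (start + end) // 2
--         count = 1
--         size = 0
--
--         for length in lecture_lengths:
--             if size + length <= mid:
--                 size += length
--             else:
--                 count += 1
--                 size = length
--         if count <= M:
--             end = mid - 1
--
--         else:
--             start = mid + 1
--
--     return start
-- ===== SOURCE B (Python) =====
-- def video_size(N, M, lecture_lengths):
--     total = sum(lecture_lengths)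
--
--     def groups(cap):
--         count, size = 1, 0
--         for length in lecture_lengths:
--             if size + length <= cap:
--                 size += length
--             else:
--                 count += 1
--                 size = length
--         return count
--
--     return next((mid for mid in range(1, total + 1) if groups(mid) <= M),
--                 total + 1)
-- ===== Notes on version B (the rewrite author's own statement) =====
-- stated objective: simpler
-- what changed: Replaces the binary search over capacities with a direct linear scan returning the first capacity in [1, sum] whose greedy group count is <= M (falling back to sum+1), relying on monotonicity of the greedy count in the capacity.
-- outside the precondition, e.g. on video_size(1, 2, [-3]): A returns 1, B returns -2
import Mathlib
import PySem

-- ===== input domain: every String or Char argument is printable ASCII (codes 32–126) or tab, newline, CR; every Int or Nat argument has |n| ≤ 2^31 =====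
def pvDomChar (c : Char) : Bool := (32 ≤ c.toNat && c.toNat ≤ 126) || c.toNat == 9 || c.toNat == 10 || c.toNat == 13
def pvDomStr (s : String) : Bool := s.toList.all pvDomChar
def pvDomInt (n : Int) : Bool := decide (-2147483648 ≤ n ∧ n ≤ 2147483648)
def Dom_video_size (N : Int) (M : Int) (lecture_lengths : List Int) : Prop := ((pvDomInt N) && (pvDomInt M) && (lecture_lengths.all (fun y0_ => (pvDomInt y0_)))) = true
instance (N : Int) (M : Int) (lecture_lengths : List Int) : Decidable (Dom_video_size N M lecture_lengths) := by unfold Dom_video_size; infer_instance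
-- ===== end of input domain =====

-- B replaces A's binary search over capacities with a linear scan returning the first
-- feasible capacity (same greedy group count); objective: simpler, not faster.

-- ===== PORT A =====
-- the while loop of A, on state (start, end); the for loop is the foldl over (count, size)
def video_size_go (M : Int) (lecture_lengths : List Int) (start endv : Int) : Int :=
  if h : start ≤ endv then
    let mid := PySem.Int.floordiv (start + endv) 2
    let cs := lecture_lengths.foldl
      (fun (p : Int × Int) length =>
        if p.2 + length ≤ mid then (p.1, p.2 + length) else (p.1 + 1, length))
      (1, 0)
    if cs.1 ≤ M then video_size_go M lecture_lengths start (mid - 1)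
    else video_size_go M lecture_lengths (mid + 1) endv
  else start
termination_by (endv + 1 - start).toNat
decreasing_by
  · have := PySem.Int.floordiv_two_mid_bounds h; omega
  · have := PySem.Int.floordiv_two_mid_bounds h; omega

def video_size (N : Int) (M : Int) (lecture_lengths : List Int) : Int :=
  video_size_go M lecture_lengths 1 lecture_lengths.sum

-- ===== PORT B =====
def video_size_alt (N : Int) (M : Int) (lecture_lengths : List Int) : Int :=
  let total := lecture_lengths.sum
  let groups := fun (cap : Int) =>
    (lecture_lengths.foldl
      (fun (p : Int × Int) length =>
        if p.2 + length ≤ cap then (p.1, p.2 + length) else (p.1 + 1, length))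
      (1, 0)).1
  match (PySem.List.pyRange 1 (total + 1) 1).find? (fun mid => decide (groups mid ≤ M)) with
  | some mid => mid
  | none => total + 1

-- ===== PRECONDITION & SPEC =====
-- Pre_ restricts to the task's natural domain of nonnegative lecture lengths; on negative
-- lengths the greedy count is not monotone in the capacity, so A's binary search and any
-- other search order return accidental, unspecifiable values there.
def Pre_video_size (N : Int) (M : Int) (lecture_lengths : List Int) : Prop :=
  ∀ x ∈ lecture_lengths, 0 ≤ x
instance (N : Int) (M : Int) (lecture_lengths : List Int) : Decidable (Pre_video_size N M lecture_lengths) := by unfold Pre_video_size; infer_instance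

def pvWitness_video_size : Int × Int × List Int := (9, 3, [1, 5, 4, 2, 1, 3])

def Spec_video_size (N : Int) (M : Int) (lecture_lengths : List Int) (out : Int) : Prop := out = video_size_alt N M lecture_lengths
instance (N : Int) (M : Int) (lecture_lengths : List Int) (out : Int) : Decidable (Spec_video_size N M lecture_lengths out) := by unfold Spec_video_size; infer_instance

-- ===== CLAIM (what is proved, stated in full; the proofs are below) =====
def Claim_equal_video_size : Prop := ∀ (N : Int) (M : Int) (lecture_lengths : List Int), Dom_video_size N M lecture_lengths → Pre_video_size N M lecture_lengths → Spec_video_size N M lecture_lengths (video_size N M lecture_lengths)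

-- ===== LEMMAS AND PROOFS =====

-- the greedy step and group count shared (syntactically) by both ports
def gstep (cap : Int) : Int × Int → Int → Int × Int := fun p length =>
  if p.2 + length ≤ cap then (p.1, p.2 + length) else (p.1 + 1, length)

def gcnt (cap : Int) (ls : List Int) : Int := (ls.foldl (gstep cap) (1, 0)).1

-- paired-run invariant: a larger capacity never needs more groups (nonnegative lengths)
lemma pair_mono (ls : List Int) (hnn : ∀ x ∈ ls, 0 ≤ x) :
    ∀ (cap cap' c s c' s' : Int), cap ≤ cap' → 0 ≤ s → 0 ≤ s' →
    (c' < c ∨ (c' = c ∧ s' ≤ s)) →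
    ((ls.foldl (gstep cap') (c', s')).1 < (ls.foldl (gstep cap) (c, s)).1 ∨
     ((ls.foldl (gstep cap') (c', s')).1 = (ls.foldl (gstep cap) (c, s)).1 ∧
      (ls.foldl (gstep cap') (c', s')).2 ≤ (ls.foldl (gstep cap) (c, s)).2)) := by
  induction ls with
  | nil => intro cap cap' c s c' s' _ _ _ h; simpa using h
  | cons L t ih =>
    intro cap cap' c s c' s' hcap hs hs' h
    have hL : 0 ≤ L := hnn L (List.mem_cons_self ..)
    have hnn' : ∀ x ∈ t, 0 ≤ x := fun x hx => hnn x (List.mem_cons_of_mem _ hx)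
    simp only [List.foldl_cons, gstep]
    by_cases h1 : s + L ≤ cap <;> by_cases h2 : s' + L ≤ cap' <;>
      simp only [h1, h2, if_pos, if_neg, not_false_iff] <;>
      [ exact ih hnn' cap cap' (c) (s + L) (c') (s' + L) hcap (by omega) (by omega) (by omega);
        exact ih hnn' cap cap' (c) (s + L) (c' + 1) (L) hcap (by omega) (by omega) (by omega);
        exact ih hnn' cap cap' (c + 1) (L) (c') (s' + L) hcap (by omega) (by omega) (by omega);
        exact ih hnn' cap cap' (c + 1) (L) (c' + 1) (L) hcap (by omega) (by omega) (by omega) ]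

lemma gcnt_mono (ls : List Int) (hnn : ∀ x ∈ ls, 0 ≤ x) {cap cap' : Int} (h : cap ≤ cap') :
    gcnt cap' ls ≤ gcnt cap ls := by
  have := pair_mono ls hnn cap cap' 1 0 1 0 h le_rfl le_rfl (Or.inr ⟨rfl, le_rfl⟩)
  unfold gcnt; omega

-- find? over range(lo, total+1) when everything below k fails and everything from k on succeeds
lemma find_aux (p : Int → Bool) (total k : Int) (hk2 : k ≤ total + 1)
    (hhigh : ∀ m, k ≤ m → m ≤ total → p m = true) :
    ∀ (n : Nat) (lo : Int), (k - lo).toNat = n → lo ≤ k →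
    (∀ m, lo ≤ m → m < k → p m = false) →
    (PySem.List.pyRange lo (total + 1) 1).find? p = if k ≤ total then some k else none := by
  intro n
  induction n with
  | zero =>
    intro lo hn hlo hlow
    have hk : lo = k := by omega
    subst hk
    by_cases hkt : lo ≤ total
    · rw [PySem.List.pyRange_one_cons (by omega)]
      simp [List.find?, hhigh lo le_rfl hkt, hkt]
    · have : lo = total + 1 := by omega
      subst this
      rw [PySem.List.pyRange_one_eq_nil le_rfl]
      simp [List.find?, hkt]
  | succ n ihn =>
    intro lo hn hlo hlow
    have hlt : lo < k := by omega
    rw [PySem.List.pyRange_one_cons (by omega)]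
    simp only [List.find?, hlow lo le_rfl hlt]
    exact ihn (lo + 1) (by omega) (by omega) (fun m hm1 hm2 => hlow m (by omega) hm2)

-- binary-search loop invariant: the loop computes the least feasible capacity
lemma go_eq (M : Int) (ls : List Int) (hnn : ∀ x ∈ ls, 0 ≤ x) :
    ∀ (n : Nat) (start endv : Int), (endv + 1 - start).toNat = n →
    1 ≤ start → start ≤ endv + 1 → endv ≤ ls.sum →
    (∀ m, 1 ≤ m → m < start → ¬ gcnt m ls ≤ M) →
    (∀ m, endv < m → m ≤ ls.sum → gcnt m ls ≤ M) →
    video_size_go M ls start endv =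
      match (PySem.List.pyRange 1 (ls.sum + 1) 1).find? (fun mid => decide (gcnt mid ls ≤ M)) with
      | some mid => mid
      | none => ls.sum + 1 := by
  intro n
  induction n using Nat.strong_induction_on with
  | _ n ih =>
    intro start endv hn h1 h2 h3 hlow hhigh
    rw [video_size_go]
    by_cases hle : start ≤ endv
    · have hmid := PySem.Int.floordiv_two_mid_bounds hle
      set mid := PySem.Int.floordiv (start + endv) 2 with hmiddef
      simp only [dif_pos hle]
      have hfold : (ls.foldl
          (fun (p : Int × Int) length =>
            if p.2 + length ≤ mid then (p.1, p.2 + length) else (p.1 + 1, length))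
          (1, 0)).1 = gcnt mid ls := rfl
      rw [hfold]
      by_cases hfeas : gcnt mid ls ≤ M
      · rw [if_pos hfeas]
        exact ih _ (by omega) start (mid - 1) rfl h1 (by omega) (by omega) hlow
          (fun m hm1 hm2 => le_trans (gcnt_mono ls hnn (by omega : mid ≤ m)) hfeas)
      · rw [if_neg hfeas]
        refine ih _ (by omega) (mid + 1) endv rfl (by omega) (by omega) h3 ?_ hhigh
        intro m hm1 hm2 hc
        exact hfeas (le_trans (gcnt_mono ls hnn (by omega : m ≤ mid)) hc)
    · simp only [dif_neg hle]
      have hstart : start = endv + 1 := by omega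
      rw [find_aux (fun mid => decide (gcnt mid ls ≤ M)) ls.sum start (by omega)
            (fun m hm1 hm2 => by simpa using hhigh m (by omega) hm2)
            (start - 1).toNat 1 (by omega) h1
            (fun m hm1 hm2 => by simpa using hlow m hm1 hm2)]
      by_cases hst : start ≤ ls.sum
      · simp [hst]
      · have : start = ls.sum + 1 := by omega
        simp [this]

lemma sum_nonneg_of_mem (ls : List Int) (hnn : ∀ x ∈ ls, 0 ≤ x) : 0 ≤ ls.sum := by
  induction ls with
  | nil => simp
  | cons L t ih =>
    have := hnn L (List.mem_cons_self ..)
    have := ih (fun x hx => hnn x (List.mem_cons_of_mem _ hx))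
    simp only [List.sum_cons]; omega

-- ===== VERDICT (by name: the statement is the Claim_ definition above) =====
theorem video_size_spec : Claim_equal_video_size := by
  intro N M ls _ hpre
  unfold Spec_video_size video_size video_size_alt
  have hsum := sum_nonneg_of_mem ls hpre
  rw [go_eq M ls hpre (ls.sum + 1 - 1).toNat 1 ls.sum rfl le_rfl (by omega) le_rfl
        (fun m hm1 hm2 => absurd hm2 (by omega))
        (fun m hm1 hm2 => absurd hm1 (by omega))]
  rfl
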